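-- pv_equiv track=rewrite | github.com/gitdshi/quantmate | app/api/routes/websocket.py | _validate_channel_access
-- ===== SOURCE A (Python) =====
-- _USER_CHANNEL_PREFIXES = ("alerts:", "orders:", "portfolio:", "paper-signals:", "paper-orders:")
--
-- def _validate_channel_access(channel: str, user_id: int) -> bool:
--     """Check that user-specific channels match the authenticated user."""
--     for prefix in _USER_CHANNEL_PREFIXES:
--         if channel.startswith(prefix):
--             try:
--                 return int(channel[len(prefix) :]) == user_id
--             except (ValueError, IndexError):
--                 return False
--     return True  # public channels (e.g. market:) are open
-- ===== SOURCE B (Python) =====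
-- _USER_CHANNEL_NAMES = {"alerts", "orders", "portfolio", "paper-signals", "paper-orders"}
--
-- def _validate_channel_access(channel: str, user_id: int) -> bool:
--     """Check that user-specific channels match the authenticated user."""
--     name, sep, rest = channel.partition(":")
--     if not sep or name not in _USER_CHANNEL_NAMES:
--         return True  # public channels (e.g. market:) are open
--     try:
--         return int(rest) == user_id
--     except ValueError:
--         return False
-- ===== Notes on version B (the rewrite author's own statement) =====
-- stated objective: idiomatic
-- what changed: B splits the channel once at its first colon with str.partition and does one O(1) set lookup of the name, instead of A's linear scan over five startswith prefixes each followed by a slice.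
import Mathlib
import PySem

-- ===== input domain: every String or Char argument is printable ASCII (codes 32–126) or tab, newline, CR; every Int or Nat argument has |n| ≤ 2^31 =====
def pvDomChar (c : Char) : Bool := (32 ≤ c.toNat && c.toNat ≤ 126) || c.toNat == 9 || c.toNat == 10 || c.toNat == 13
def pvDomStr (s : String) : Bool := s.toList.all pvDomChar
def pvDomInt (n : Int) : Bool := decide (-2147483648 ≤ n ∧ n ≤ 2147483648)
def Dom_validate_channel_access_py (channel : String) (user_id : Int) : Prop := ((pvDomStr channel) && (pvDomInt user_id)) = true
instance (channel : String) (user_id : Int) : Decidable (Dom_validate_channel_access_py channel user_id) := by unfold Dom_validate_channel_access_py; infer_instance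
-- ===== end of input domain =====

-- B splits the channel once at its first colon (str.partition) and checks the name
-- against a set of user-channel names, instead of A's loop of five startswith tests.
-- Objective: idiomatic; return values proved equal on the whole domain.

-- ===== PORT A =====
def pvPrefixesA : List String :=
  ["alerts:", "orders:", "portfolio:", "paper-signals:", "paper-orders:"]

-- the for-loop over _USER_CHANNEL_PREFIXES with early return
def pvLoopA (channel : String) (user_id : Int) : List String → Bool
  | [] => true
  | p :: ps =>
    if PySem.Str.startswith channel p then
      -- int(channel[len(prefix):]) == user_id, ValueError → False (IndexError cannot occur)
      match PySem.Int.ofChars? (PySem.List.slice channel.toList (some (p.toList.length : Int)) none) with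
      | some n => decide (n = user_id)
      | none => false
    else pvLoopA channel user_id ps

def validate_channel_access_py (channel : String) (user_id : Int) : Bool :=
  pvLoopA channel user_id pvPrefixesA

-- ===== PORT B =====
def pvNamesB : List (List Char) :=
  ["alerts".toList, "orders".toList, "portfolio".toList, "paper-signals".toList, "paper-orders".toList]

def validate_channel_access_py_alt (channel : String) (user_id : Int) : Bool :=
  -- name, sep, rest = channel.partition(':'): name = chars before the first ':',
  -- sep empty iff no ':' occurs, rest = chars after the first ':'
  let cs := channel.toList
  let name := cs.takeWhile (fun c => c ≠ ':')
  if name.length = cs.length || !(pvNamesB.contains name) then true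
  else
    match PySem.Int.ofChars? (cs.drop (name.length + 1)) with
    | some n => decide (n = user_id)
    | none => false

-- ===== PRECONDITION & SPEC =====
def Spec_validate_channel_access_py (channel : String) (user_id : Int) (out : Bool) : Prop := out = validate_channel_access_py_alt channel user_id
instance (channel : String) (user_id : Int) (out : Bool) : Decidable (Spec_validate_channel_access_py channel user_id out) := by unfold Spec_validate_channel_access_py; infer_instance

-- ===== CLAIM (what is proved, stated in full; the proofs are below) =====
def Claim_equal_validate_channel_access_py : Prop := ∀ (channel : String) (user_id : Int), Dom_validate_channel_access_py channel user_id → Spec_validate_channel_access_py channel user_id (validate_channel_access_py channel user_id)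

-- ===== LEMMAS AND PROOFS =====

set_option maxRecDepth 8000

-- a prefix "name:" (with ':' not in name) matches exactly when the segment before the
-- first colon is name and a colon is present
lemma prefix_colon_iff (name cs : List Char) (h : ':' ∉ name) :
    (name ++ [':']) <+: cs ↔
      (cs.takeWhile (fun c => c ≠ ':') = name ∧ (cs.takeWhile (fun c => c ≠ ':')).length < cs.length) := by
  induction cs generalizing name with
  | nil =>
    simp
  | cons c cs ih =>
    by_cases hc : c = ':'
    · subst hc
      cases name with
      | nil => simp
      | cons a name =>
        simp only [List.cons_append, List.cons_prefix_cons, List.takeWhile]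
        constructor
        · rintro ⟨rfl, -⟩; exact absurd (List.mem_cons_self) h
        · rintro ⟨heq, -⟩
          simp at heq
    · cases name with
      | nil =>
        have hpc : decide (c ≠ ':') = true := by simpa using hc
        rw [List.nil_append, List.cons_prefix_cons, List.takeWhile_cons, if_pos hpc]
        constructor
        · rintro ⟨h1, -⟩; exact absurd h1.symm hc
        · rintro ⟨h1, -⟩; simp at h1
      | cons a name =>
        have ha : ':' ∉ name := fun hm => h (List.mem_cons_of_mem _ hm)
        have : (fun c => decide (c ≠ ':')) c = true := by simpa using hc
        simp only [List.cons_append, List.cons_prefix_cons, List.takeWhile, this]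
        rw [ih name ha]
        constructor
        · rintro ⟨rfl, ht, hl⟩
          exact ⟨by rw [ht], by simpa using hl⟩
        · rintro ⟨heq, hl⟩
          rw [List.cons_eq_cons] at heq
          exact ⟨heq.1.symm, heq.2, by simpa using hl⟩

-- evaluate one startswith test of A against the takeWhile decomposition
lemma startswith_colon (channel : String) (name : List Char) (h : ':' ∉ name) :
    PySem.Str.startswith channel (String.ofList (name ++ [':'])) =
      (decide (channel.toList.takeWhile (fun c => c ≠ ':') = name) &&
       decide ((channel.toList.takeWhile (fun c => c ≠ ':')).length < channel.toList.length)) := by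
  have hsw : PySem.Str.startswith channel (String.ofList (name ++ [':'])) =
      decide ((name ++ [':']) <+: channel.toList) := by
    by_cases hp : (name ++ [':']) <+: channel.toList
    · simp only [hp, decide_true]
      rw [PySem.Str.startswith_eq]
      exact (PySem.Chars.startswith_iff _ _).2 (by simpa using hp)
    · simp only [hp, decide_false]
      rw [PySem.Str.startswith_eq, ← Bool.not_eq_true]
      intro hb
      exact hp (by simpa using (PySem.Chars.startswith_iff _ _).1 hb)
  rw [hsw, ← Bool.decide_and]
  exact decide_eq_decide.2 (prefix_colon_iff name channel.toList h)

-- ===== VERDICT (by name: the statement is the Claim_ definition above) =====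
theorem validate_channel_access_py_spec : Claim_equal_validate_channel_access_py := by
  intro channel user_id _
  unfold Spec_validate_channel_access_py validate_channel_access_py validate_channel_access_py_alt
  simp only [pvPrefixesA, pvLoopA]
  rw [show ("alerts:" : String) = String.ofList ("alerts".toList ++ [':']) from rfl,
      startswith_colon channel "alerts".toList (by decide),
      show ("orders:" : String) = String.ofList ("orders".toList ++ [':']) from rfl,
      startswith_colon channel "orders".toList (by decide),
      show ("portfolio:" : String) = String.ofList ("portfolio".toList ++ [':']) from rfl,
      startswith_colon channel "portfolio".toList (by decide),
      show ("paper-signals:" : String) = String.ofList ("paper-signals".toList ++ [':']) from rfl,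
      startswith_colon channel "paper-signals".toList (by decide),
      show ("paper-orders:" : String) = String.ofList ("paper-orders".toList ++ [':']) from rfl,
      startswith_colon channel "paper-orders".toList (by decide)]
  have hle : (channel.toList.takeWhile (fun c => !decide (c = ':'))).length ≤ channel.length := by
    simpa using (List.takeWhile_sublist (p := fun c => !decide (c = ':')) (l := channel.toList)).length_le
  by_cases hlen : (channel.toList.takeWhile (fun c => !decide (c = ':'))).length = channel.length
  · simp [hlen]
  · have hlt : (channel.toList.takeWhile (fun c => !decide (c = ':'))).length < channel.length := by omega
    by_cases h1 : channel.toList.takeWhile (fun c => !decide (c = ':')) = ['a','l','e','r','t','s']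
    · have hl' : 6 < channel.length := by rw [h1] at hlt; simpa using hlt
      have hne : (6:Nat) ≠ channel.length := Nat.ne_of_lt hl'
      simp [h1, hl', hne, pvNamesB, PySem.List.slice_from]
    · by_cases h2 : channel.toList.takeWhile (fun c => !decide (c = ':')) = ['o','r','d','e','r','s']
      · have hl' : 6 < channel.length := by rw [h2] at hlt; simpa using hlt
        have hne : (6:Nat) ≠ channel.length := Nat.ne_of_lt hl'
        simp [h2, hl', hne, pvNamesB, PySem.List.slice_from]
      · by_cases h3 : channel.toList.takeWhile (fun c => !decide (c = ':')) = ['p','o','r','t','f','o','l','i','o']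
        · have hl' : 9 < channel.length := by rw [h3] at hlt; simpa using hlt
          have hne : (9:Nat) ≠ channel.length := Nat.ne_of_lt hl'
          simp [h3, hl', hne, pvNamesB, PySem.List.slice_from]
        · by_cases h4 : channel.toList.takeWhile (fun c => !decide (c = ':')) = ['p','a','p','e','r','-','s','i','g','n','a','l','s']
          · have hl' : 13 < channel.length := by rw [h4] at hlt; simpa using hlt
            have hne : (13:Nat) ≠ channel.length := Nat.ne_of_lt hl'
            simp [h4, hl', hne, pvNamesB, PySem.List.slice_from]
          · by_cases h5 : channel.toList.takeWhile (fun c => !decide (c = ':')) = ['p','a','p','e','r','-','o','r','d','e','r','s']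
            · have hl' : 12 < channel.length := by rw [h5] at hlt; simpa using hlt
              have hne : (12:Nat) ≠ channel.length := Nat.ne_of_lt hl'
              simp [h5, hl', hne, pvNamesB, PySem.List.slice_from]
            · simp [h1, h2, h3, h4, h5, hlt, hlen, pvNamesB]
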